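-- pv_equiv track=rewrite | github.com/Jeeyeonn/Algorithm | 데브매칭_코테/1번.py | solution
-- ===== SOURCE A (Python) =====
-- def solution(registered_list, new_id):
--
--     if new_id not in registered_list:
--         return new_id
--     else:
--         index = len(new_id)
--         for i in range(len(new_id)):
--             if new_id[i].isdigit():
--                 index = i
--                 break
--
--         new_s = new_id[:index]
--         new_n = new_id[index:]
--         if len(new_id[index:]) == 0:
--             new_n = 0
--         else:
--             new_n = int(new_n)
--
--         num = []
--         for j in registered_list:
--             if new_s in j:
--                 j_num = j[len(new_s):]
--                 if len(j_num) == 0: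
--                     j_num = '0'
--                 num.append(int(j_num))
--
--         while True:
--             if new_n not in num:
--                 break
--             else:
--                 new_n += 1
--
--
--     return new_s+str(new_n)
-- ===== SOURCE B (Python) =====
-- def solution(registered_list, new_id):
--     if new_id not in registered_list:
--         return new_id
--     index = next((i for i, c in enumerate(new_id) if c.isdigit()), len(new_id))
--     prefix = new_id[:index]
--     tail = new_id[index:]
--     m = int(tail) if tail else 0
--     used = sorted({int(j[len(prefix):] or '0') for j in registered_list if prefix in j})
--     for v in used:
--         if v == m:
--             m += 1
--         elif v > m:
--             break
--     return prefix + str(m)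
-- ===== Notes on version B (the rewrite author's own statement) =====
-- stated objective: alternative
-- what changed: A probes candidate suffix numbers one at a time with a `while new_n in num` linear membership scan; B sorts the distinct used suffix numbers once and finds the first free number >= new_n in a single gap-scan pass (and gathers the digit index and used numbers with next()/comprehensions instead of index loops).
import Mathlib
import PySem

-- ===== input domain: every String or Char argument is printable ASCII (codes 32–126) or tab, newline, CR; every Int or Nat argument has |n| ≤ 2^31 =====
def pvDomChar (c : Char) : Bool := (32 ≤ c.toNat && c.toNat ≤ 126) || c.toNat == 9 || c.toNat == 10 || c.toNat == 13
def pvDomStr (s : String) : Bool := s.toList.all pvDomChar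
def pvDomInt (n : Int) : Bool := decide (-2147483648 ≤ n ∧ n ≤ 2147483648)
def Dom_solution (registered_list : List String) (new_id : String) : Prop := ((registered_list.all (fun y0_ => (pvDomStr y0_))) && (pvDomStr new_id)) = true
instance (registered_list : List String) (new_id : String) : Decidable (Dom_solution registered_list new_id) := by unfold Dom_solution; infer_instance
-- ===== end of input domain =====

-- B replaces A's unbounded while-loop linear membership probe with a sort of the
-- distinct used suffix numbers followed by a single gap-scan pass (objective: alternative).

-- ===== PORT A =====

-- A's first-digit-index loop with break
def pvDigitLoopA : List Char → Nat → Nat → Nat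
  | [], _, index => index
  | c :: rest, i, index =>
    if PySem.Chars.isdigit c then i else pvDigitLoopA rest (i + 1) index

-- A's loop collecting int(j[len(new_s):]) for each j containing new_s
def pvNumLoopA (registered_list : List String) (new_s : List Char) : List Int :=
  registered_list.foldl (fun num j =>
    if PySem.Chars.isIn new_s j.toList then
      num ++ [(PySem.Int.ofChars?
        (if (PySem.List.slice j.toList (some (new_s.length : Int)) none).length == 0
         then ['0']
         else PySem.List.slice j.toList (some (new_s.length : Int)) none)).getD 0]
    else num) []

-- termination measure for A's while-loop probe (cited by pvProbeA's decreasing_by)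
theorem pvFilterGeLt (num : List Int) (n : Int) (h : n ∈ num) :
    (num.filter (fun x => decide (n + 1 ≤ x))).length < (num.filter (fun x => decide (n ≤ x))).length := by
  have hsub : (num.filter (fun x => decide (n + 1 ≤ x))).Sublist (num.filter (fun x => decide (n ≤ x))) :=
    List.monotone_filter_right num (by intro x hx; simp at hx ⊢; omega)
  have hmemq : n ∈ num.filter (fun x => decide (n ≤ x)) := List.mem_filter.mpr ⟨h, by simp⟩
  have hmemp : n ∉ num.filter (fun x => decide (n + 1 ≤ x)) := fun hc => by
    have := (List.mem_filter.mp hc).2; simp at this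
  refine lt_of_le_of_ne hsub.length_le (fun heq => hmemp ?_)
  rw [hsub.eq_of_length heq]
  exact hmemq

-- A's while-loop: increment new_n until it is not in num
def pvProbeA (num : List Int) (n : Int) : Int :=
  if h : n ∈ num then pvProbeA num (n + 1) else n
termination_by (num.filter (fun x => decide (n ≤ x))).length
decreasing_by exact pvFilterGeLt num n h

def solution (registered_list : List String) (new_id : String) : String :=
  if new_id ∈ registered_list then
    let cs := new_id.toList
    let index := pvDigitLoopA cs 0 cs.length
    let new_s := PySem.List.slice cs none (some (index : Int))
    let tail := PySem.List.slice cs (some (index : Int)) none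
    let new_n : Int := if tail.length == 0 then 0 else (PySem.Int.ofChars? tail).getD 0
    let num := pvNumLoopA registered_list new_s
    String.ofList (new_s ++ PySem.Int.toChars (pvProbeA num new_n))
  else new_id

-- ===== PORT B =====

-- B's gap scan: for v in used: if v == m: m += 1; elif v > m: break
def pvScanB : List Int → Int → Int
  | [], m => m
  | v :: vs, m => if v = m then pvScanB vs (m + 1) else if m < v then m else pvScanB vs m

-- B's sorted set comprehension of used suffix numbers
def pvUsedB (registered_list : List String) (pre : List Char) : List Int :=
  PySem.List.sorted
    (PySem.Set.ofList
      ((registered_list.filter (fun j => PySem.Chars.isIn pre j.toList)).map (fun j =>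
        let t := PySem.List.slice j.toList (some (pre.length : Int)) none
        (PySem.Int.ofChars? (if t.isEmpty then ['0'] else t)).getD 0)))
    (fun x => x) false

def solution_alt (registered_list : List String) (new_id : String) : String :=
  if new_id ∈ registered_list then
    let cs := new_id.toList
    let index := (cs.findIdx? (fun c => PySem.Chars.isdigit c)).getD cs.length
    let pre := cs.take index
    let tail := cs.drop index
    let m : Int := if tail.isEmpty then 0 else (PySem.Int.ofChars? tail).getD 0
    String.ofList (pre ++ PySem.Int.toChars (pvScanB (pvUsedB registered_list pre) m))
  else new_id

-- ===== PRECONDITION & SPEC =====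

-- Pre_ excludes exactly the inputs on which Python A raises ValueError from int():
-- new_id is registered and some registered string containing the digit-free prefix has a
-- non-empty remainder after it that is not an integer literal (B raises ValueError there too).
def Pre_solution (registered_list : List String) (new_id : String) : Prop :=
  new_id ∈ registered_list →
    ∀ j ∈ registered_list,
      PySem.Chars.isIn
        (new_id.toList.take ((new_id.toList.findIdx? (fun c => PySem.Chars.isdigit c)).getD new_id.toList.length))
        j.toList = true →
      j.toList.drop ((new_id.toList.findIdx? (fun c => PySem.Chars.isdigit c)).getD new_id.toList.length) ≠ [] →
      (PySem.Int.ofChars?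
        (j.toList.drop ((new_id.toList.findIdx? (fun c => PySem.Chars.isdigit c)).getD new_id.toList.length))).isSome = true

instance (registered_list : List String) (new_id : String) : Decidable (Pre_solution registered_list new_id) := by
  unfold Pre_solution; infer_instance

def pvWitness_solution : List String × String := (["a1"], "a1")

def Spec_solution (registered_list : List String) (new_id : String) (out : String) : Prop := out = solution_alt registered_list new_id
instance (registered_list : List String) (new_id : String) (out : String) : Decidable (Spec_solution registered_list new_id out) := by unfold Spec_solution; infer_instance

-- ===== CLAIM (what is proved, stated in full; the proofs are below) =====
def Claim_equal_solution : Prop := ∀ (registered_list : List String) (new_id : String), Dom_solution registered_list new_id → Pre_solution registered_list new_id → Spec_solution registered_list new_id (solution registered_list new_id)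

-- ===== LEMMAS AND PROOFS =====

-- A's index loop equals findIdx? with fallback
theorem pvDigitLoopA_eq (cs : List Char) (i fb : Nat) :
    pvDigitLoopA cs i fb =
      match cs.findIdx? (fun c => PySem.Chars.isdigit c) with
      | some k => i + k
      | none => fb := by
  induction cs generalizing i with
  | nil => simp [pvDigitLoopA]
  | cons c rest ih =>
    simp only [pvDigitLoopA, List.findIdx?_cons]
    by_cases h : PySem.Chars.isdigit c
    · simp [h]
    · rw [if_neg (by simp [h]), if_neg (by simp [h]), ih (i + 1)]
      cases hfi : rest.findIdx? (fun c => PySem.Chars.isdigit c) with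
      | none => simp
      | some k => simp only [Option.map_some]; ac_rfl

-- characterisation of A's probe: first value ≥ n outside num
theorem pvProbeA_spec (num : List Int) (n : Int) :
    n ≤ pvProbeA num n ∧ pvProbeA num n ∉ num ∧
      ∀ k, n ≤ k → k < pvProbeA num n → k ∈ num := by
  induction n using pvProbeA.induct num with
  | case1 n h ih =>
    rw [pvProbeA, dif_pos h]
    obtain ⟨h1, h2, h3⟩ := ih
    refine ⟨by omega, h2, fun k hk1 hk2 => ?_⟩
    by_cases hkn : k = n
    · exact hkn ▸ h
    · exact h3 k (by omega) hk2
  | case2 n h =>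
    rw [pvProbeA, dif_neg h]
    exact ⟨le_refl n, h, fun k hk1 hk2 => by omega⟩

-- characterisation of B's gap scan over a strictly sorted list
theorem pvScanB_spec (L : List Int) (m : Int) (hs : L.Pairwise (· < ·)) :
    m ≤ pvScanB L m ∧ pvScanB L m ∉ L ∧
      ∀ k, m ≤ k → k < pvScanB L m → k ∈ L := by
  induction L generalizing m with
  | nil =>
    refine ⟨le_refl m, by simp, fun k h1 h2 => ?_⟩
    simp only [pvScanB] at h2; omega
  | cons v vs ih =>
    have hvs : vs.Pairwise (· < ·) := hs.tail
    have hv : ∀ y ∈ vs, v < y := fun y hy => List.rel_of_pairwise_cons hs hy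
    by_cases hvm : v = m
    · subst hvm
      have hstep : pvScanB (v :: vs) v = pvScanB vs (v + 1) := by simp [pvScanB]
      rw [hstep]
      obtain ⟨h1, h2, h3⟩ := ih (v + 1) hvs
      refine ⟨by omega, ?_, fun k hk1 hk2 => ?_⟩
      · simp only [List.mem_cons, not_or]
        exact ⟨by omega, h2⟩
      · by_cases hkv : k = v
        · simp [hkv]
        · exact List.mem_cons_of_mem v (h3 k (by omega) hk2)
    · by_cases hlt : m < v
      · have hstep : pvScanB (v :: vs) m = m := by simp [pvScanB, hvm, hlt]
        rw [hstep]
        refine ⟨le_refl m, ?_, fun k h1 h2 => by omega⟩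
        simp only [List.mem_cons, not_or]
        exact ⟨by omega, fun hm => by have := hv m hm; omega⟩
      · have hstep : pvScanB (v :: vs) m = pvScanB vs m := by simp [pvScanB, hvm, hlt]
        rw [hstep]
        obtain ⟨h1, h2, h3⟩ := ih m hvs
        refine ⟨h1, ?_, fun k hk1 hk2 => List.mem_cons_of_mem v (h3 k hk1 hk2)⟩
        simp only [List.mem_cons, not_or]
        exact ⟨fun hvp => by omega, h2⟩

-- the two characterisations pin the same value
theorem pvProbeA_eq_pvScanB (num : List Int) (n : Int) :
    pvProbeA num n = pvScanB (PySem.List.sorted (PySem.Set.ofList num) (fun x => x) false) n := by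
  set L := PySem.List.sorted (PySem.Set.ofList num) (fun x => x) false with hL
  have hperm : L.Perm (PySem.Set.ofList num) := PySem.List.sorted_perm _ _ _
  have hmem : ∀ x : Int, x ∈ L ↔ x ∈ num := fun x =>
    (hperm.mem_iff).trans (PySem.Set.mem_ofList num x)
  have hnd : L.Nodup := (hperm.nodup_iff).mpr (PySem.Set.nodup_ofList num)
  have hle : L.Pairwise (· ≤ ·) := PySem.List.sorted_pairwise _ _
  have hlt : L.Pairwise (· < ·) := by
    have := List.Pairwise.and hle hnd
    exact this.imp (fun h => lt_of_le_of_ne h.1 h.2)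
  obtain ⟨a1, a2, a3⟩ := pvProbeA_spec num n
  obtain ⟨b1, b2, b3⟩ := pvScanB_spec L n hlt
  rcases lt_trichotomy (pvProbeA num n) (pvScanB L n) with h | h | h
  · exact absurd ((hmem _).mp (b3 _ a1 h)) a2
  · exact h
  · exact absurd ((hmem _).mpr (a3 _ b1 h)) b2

-- A's num list is the filtered map B collects before dedup+sort
theorem pvNumLoopA_eq (registered_list : List String) (s : List Char) :
    pvNumLoopA registered_list s =
      (registered_list.filter (fun j => PySem.Chars.isIn s j.toList)).map (fun j =>
        let t := PySem.List.slice j.toList (some (s.length : Int)) none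
        (PySem.Int.ofChars? (if t.isEmpty then ['0'] else t)).getD 0) := by
  unfold pvNumLoopA
  have hbody : (fun (num : List Int) (j : String) =>
      if PySem.Chars.isIn s j.toList then
        num ++ [(PySem.Int.ofChars?
          (if (PySem.List.slice j.toList (some (s.length : Int)) none).length == 0
           then ['0']
           else PySem.List.slice j.toList (some (s.length : Int)) none)).getD 0]
      else num)
      = (fun (num : List Int) (j : String) =>
        if PySem.Chars.isIn s j.toList then
          num ++ [(fun j =>
            let t := PySem.List.slice j.toList (some (s.length : Int)) none
            (PySem.Int.ofChars? (if t.isEmpty then ['0'] else t)).getD 0) j]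
        else num) := by
    funext num j
    by_cases h : PySem.Chars.isIn s j.toList
    · simp only [h, if_true]
      have hcond : (PySem.List.slice j.toList (some ((s.length : Nat) : Int)) none).isEmpty
          = ((PySem.List.slice j.toList (some ((s.length : Nat) : Int)) none).length == 0) := by
        cases PySem.List.slice j.toList (some ((s.length : Nat) : Int)) none <;> simp
      rw [hcond]
    · simp [h]
  rw [hbody, PySem.List.foldl_append_if]
  simp

-- ===== VERDICT (by name: the statement is the Claim_ definition above) =====
theorem solution_spec : Claim_equal_solution := by
  intro registered_list new_id _ _
  unfold Spec_solution solution solution_alt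
  by_cases h : new_id ∈ registered_list
  · simp only [h, if_pos]
    have hidx : pvDigitLoopA new_id.toList 0 new_id.toList.length =
        (new_id.toList.findIdx? (fun c => PySem.Chars.isdigit c)).getD new_id.toList.length := by
      rw [pvDigitLoopA_eq]
      cases new_id.toList.findIdx? (fun c => PySem.Chars.isdigit c) <;> simp
    rw [hidx]
    set idx := (new_id.toList.findIdx? (fun c => PySem.Chars.isdigit c)).getD new_id.toList.length
    rw [PySem.List.slice_to_natCast, PySem.List.slice_from_natCast]
    have hcond : (new_id.toList.drop idx).isEmpty = ((new_id.toList.drop idx).length == 0) := by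
      cases new_id.toList.drop idx <;> simp
    rw [hcond]
    rw [pvProbeA_eq_pvScanB, pvNumLoopA_eq]
    rfl
  · simp [h]
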